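-- pv_equiv track=rewrite | github.com/Alec8888/advent_of_code | Days/Day9/s2.py | get_first_fragged_block
-- ===== SOURCE A (Python) =====
-- from typing import List, Tuple, Dict
--
-- def get_first_fragged_block(disk: List) -> int:
--     fragged_block_pos = None
--     potential_pos = None
--     free_block_seen = False
--     free = '.'
--     for i, block in enumerate(disk):
--         if block != free and free_block_seen:
--             fragged_block_pos = potential_pos
--             return fragged_block_pos
--         if block == free and not free_block_seen:
--             free_block_seen = True
--             potential_pos = i
--
--     return fragged_block_pos
-- ===== SOURCE B (Python) =====
-- def get_first_fragged_block(disk):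
--     # Scan backwards to find the last file block; then scan forwards for a
--     # free block strictly before it.
--     q = None
--     for i in range(len(disk) - 1, -1, -1):
--         if disk[i] != '.':
--             q = i
--             break
--     if q is None:
--         return None
--     for i in range(q):
--         if disk[i] == '.':
--             return i
--     return None
-- ===== Notes on version B (the rewrite author's own statement) =====
-- stated objective: alternative
-- what changed: Instead of A's single forward stateful scan (seen-flag + potential_pos), B scans BACKWARDS to locate the last file block and then scans forwards for the first free block strictly before it; the first free index is the answer iff a file block lies after it, i.e. iff it precedes the last file block.
import Mathlib
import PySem

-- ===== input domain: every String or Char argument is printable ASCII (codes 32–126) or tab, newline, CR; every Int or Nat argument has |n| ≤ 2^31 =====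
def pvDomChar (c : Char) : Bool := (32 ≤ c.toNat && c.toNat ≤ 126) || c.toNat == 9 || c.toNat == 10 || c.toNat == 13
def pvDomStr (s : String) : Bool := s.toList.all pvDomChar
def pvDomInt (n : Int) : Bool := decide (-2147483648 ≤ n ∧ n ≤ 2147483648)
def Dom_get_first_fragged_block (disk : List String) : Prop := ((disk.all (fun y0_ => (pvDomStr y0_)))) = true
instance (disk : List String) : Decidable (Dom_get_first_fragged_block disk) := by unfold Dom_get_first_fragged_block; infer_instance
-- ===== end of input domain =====

-- B reverses the strategy: it scans BACKWARDS for the last file block, then forwards for the first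
-- free block strictly before it (alternative decomposition; same O(n)).


-- ===== PORT A =====
-- A's loop: enumerate with state (potential_pos, free_block_seen); early return on a file block after a free one.
def get_first_fragged_block_go : List String → Int → Option Int → Bool → Option Int
  | [], _, _, _ => none
  | block :: rest, i, pot, seen =>
    if (block != ".") && seen then pot
    else if (block == ".") && !seen then get_first_fragged_block_go rest (i + 1) (some i) true
    else get_first_fragged_block_go rest (i + 1) pot seen

def get_first_fragged_block (disk : List String) : Option Int :=
  get_first_fragged_block_go disk 0 none false

-- ===== PORT B =====
-- Source B, first loop: 'for i in range(len(disk)-1, -1, -1): if disk[i] != ".": q = i; break'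
-- ported as structural recursion over disk.reverse with the index counting down — the same
-- sequence of (index, element) visits as Python's descending range over disk.
def pv_lastFile_go : List String → Int → Option Int
  | [], _ => none
  | b :: t, i => if b != "." then some i else pv_lastFile_go t (i - 1)

-- Source B, second loop: 'for i in range(q): if disk[i] == ".": return i' — forward scan bounded by q.
def pv_firstFree_go : List String → Int → Int → Option Int
  | [], _, _ => none
  | b :: t, i, q => if i < q then (if b == "." then some i else pv_firstFree_go t (i + 1) q) else none

def get_first_fragged_block_alt (disk : List String) : Option Int :=
  match pv_lastFile_go disk.reverse ((disk.length : Int) - 1) with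
  | none => none
  | some q => pv_firstFree_go disk 0 q

-- ===== PRECONDITION & SPEC =====
def Spec_get_first_fragged_block (disk : List String) (out : Option Int) : Prop := out = get_first_fragged_block_alt disk
instance (disk : List String) (out : Option Int) : Decidable (Spec_get_first_fragged_block disk out) := by unfold Spec_get_first_fragged_block; infer_instance

-- ===== CLAIM (what is proved, stated in full; the proofs are below) =====
def Claim_equal_get_first_fragged_block : Prop := ∀ (disk : List String), Dom_get_first_fragged_block disk → Spec_get_first_fragged_block disk (get_first_fragged_block disk)

-- ===== LEMMAS AND PROOFS =====

-- After the first free block is seen, A returns pot at the first file block, else none.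
theorem go_seen (rest : List String) : ∀ (i : Int) (pot : Option Int),
    get_first_fragged_block_go rest i pot true = if rest.any (· != ".") then pot else none := by
  induction rest with
  | nil => intro i pot; simp [get_first_fragged_block_go]
  | cons b t ih =>
    intro i pot
    by_cases hb : b = "."
    · subst hb; simp [get_first_fragged_block_go, ih]
    · simp [get_first_fragged_block_go, hb]

-- A's closed form: at the first free block k, return some k iff a file block follows.
theorem go_unseen (rest : List String) : ∀ (i : Int),
    get_first_fragged_block_go rest i none false =
      match PySem.List.index? rest "." with
      | none => none
      | some k => if (rest.drop (k + 1)).any (· != ".") then some (i + (k : Int)) else none := by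
  induction rest with
  | nil => intro i; simp [get_first_fragged_block_go, PySem.List.index?]
  | cons b t ih =>
    intro i
    by_cases hb : b = "."
    · subst hb
      rw [PySem.List.index?_cons_self]
      simp [get_first_fragged_block_go, go_seen]
    · rw [PySem.List.index?_cons_of_ne t hb]
      have : get_first_fragged_block_go (b :: t) i none false
          = get_first_fragged_block_go t (i + 1) none false := by
        simp [get_first_fragged_block_go, hb]
      rw [this, ih]
      cases h : PySem.List.index? t "." with
      | none => simp
      | some k =>
        simp only [Option.map_some]
        have hd : (b :: t).drop (k + 1 + 1) = t.drop (k + 1) := rfl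
        have hi : i + 1 + (k : Int) = i + ((k : Int) + 1) := by ring
        rw [hd, hi]
        push_cast
        ring_nf

-- The backward scan returns none iff every block is free.
theorem lastFile_none (r : List String) : ∀ (i : Int),
    pv_lastFile_go r i = none ↔ ∀ x ∈ r, x = "." := by
  induction r with
  | nil => intro i; simp [pv_lastFile_go]
  | cons b t ih =>
    intro i
    by_cases hb : b = "."
    · subst hb; simp [pv_lastFile_go, ih]
    · simp [pv_lastFile_go, hb]

-- The backward scan returns i - j where j indexes the first non-free block of r.
theorem lastFile_some (r : List String) : ∀ (i v : Int), pv_lastFile_go r i = some v →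
    ∃ j, ∃ hj : j < r.length, v = i - (j : Int) ∧ r[j] ≠ "." ∧ ∀ m (hm : m < j), r[m]'(by omega) = "." := by
  induction r with
  | nil => intro i v h; simp [pv_lastFile_go] at h
  | cons b t ih =>
    intro i v h
    by_cases hb : b = "."
    · subst hb
      simp only [pv_lastFile_go, bne_self_eq_false, Bool.false_eq_true, if_false] at h
      obtain ⟨j, hj, hv, hne, hall⟩ := ih (i - 1) v h
      refine ⟨j + 1, by simpa using Nat.succ_lt_succ hj, by push_cast; omega, by simpa using hne, ?_⟩
      intro m hm
      cases m with
      | zero => rfl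
      | succ m' => simpa using hall m' (by omega)
    · simp only [pv_lastFile_go, bne_iff_ne, ne_eq, hb, not_false_eq_true, if_true,
        Option.some.injEq] at h
      exact ⟨0, by simp, by simp [h], by simpa using hb, by intro m hm; omega⟩

-- The bounded forward scan equals: first free index p, returned iff i + p < q.
theorem firstFree_spec (l : List String) : ∀ (i q : Int),
    pv_firstFree_go l i q =
      match PySem.List.index? l "." with
      | none => none
      | some p => if i + (p : Int) < q then some (i + (p : Int)) else none := by
  induction l with
  | nil => intro i q; simp [pv_firstFree_go, PySem.List.index?]
  | cons b t ih =>
    intro i q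
    by_cases hb : b = "."
    · subst hb
      rw [PySem.List.index?_cons_self]
      by_cases hiq : i < q <;> simp [pv_firstFree_go, hiq]
    · rw [PySem.List.index?_cons_of_ne t hb]
      have hstep : pv_firstFree_go (b :: t) i q
          = if i < q then pv_firstFree_go t (i + 1) q else none := by
        simp [pv_firstFree_go, hb]
      rw [hstep, ih]
      cases h : PySem.List.index? t "." with
      | none => simp
      | some p =>
        simp only [Option.map_some]
        by_cases hiq : i < q
        · simp only [hiq, if_true]
          have h1 : i + 1 + (p : Int) = i + ((p : Int) + 1) := by ring
          rw [h1]; push_cast; ring_nf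
        · have hnot : ¬ i + ((p : Int) + 1) < q := by omega
          simp [hiq, hnot]

-- ===== VERDICT (by name: the statement is the Claim_ definition above) =====
theorem get_first_fragged_block_spec : Claim_equal_get_first_fragged_block := by
  intro disk _
  unfold Spec_get_first_fragged_block get_first_fragged_block get_first_fragged_block_alt
  rw [go_unseen]
  cases h : PySem.List.index? disk "." with
  | none =>
    cases hl : pv_lastFile_go disk.reverse ((disk.length : Int) - 1) with
    | none => rfl
    | some q => dsimp only; rw [firstFree_spec]; simp [-PySem.List.index?_eq_idxOf?, h]
  | some k =>
    obtain ⟨hk, hdk, _⟩ := PySem.List.getElem_of_index?_eq_some h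
    cases hl : pv_lastFile_go disk.reverse ((disk.length : Int) - 1) with
    | none =>
      have hall : ∀ x ∈ disk, x = "." := by
        intro x hx
        exact ((lastFile_none disk.reverse _).mp hl) x (List.mem_reverse.mpr hx)
      have hany : (disk.drop (k + 1)).any (· != ".") = false := by
        rw [Bool.eq_false_iff]
        intro hc
        obtain ⟨x, hx, hxne⟩ := List.any_eq_true.mp hc
        rw [hall x (List.mem_of_mem_drop hx)] at hxne
        simp at hxne
      simp [hany]
    | some q =>
      obtain ⟨j, hj, hv, hne, hall⟩ := lastFile_some disk.reverse _ _ hl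
      rw [List.length_reverse] at hj
      have hjlen : j < disk.length := hj
      -- qn : the disk index of the last file block
      set qn : Nat := disk.length - 1 - j with hqn
      have hrj : disk.reverse[j]'(by simpa using hjlen) = disk[qn]'(by omega) := by
        rw [List.getElem_reverse]
      have hqv : q = (qn : Int) := by
        rw [hv]; omega
      -- every disk index strictly above qn is free
      have habove : ∀ t (ht : t < disk.length), qn < t → disk[t] = "." := by
        intro t ht hqt
        have hm : disk.length - 1 - t < j := by omega
        have := hall (disk.length - 1 - t) hm
        rw [List.getElem_reverse] at this
        have : disk[disk.length - 1 - (disk.length - 1 - t)]'(by omega) = "." := this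
        simpa [Nat.sub_sub_self (by omega : t ≤ disk.length - 1)] using this
      dsimp only
      rw [firstFree_spec]
      simp only [h]
      by_cases hlt : (0 : Int) + (k : Int) < q
      · -- a file block (at qn) follows k : the suffix any is true
        have hkq : k < qn := by rw [hqv] at hlt; omega
        have hmem : disk[qn]'(by omega) ∈ disk.drop (k + 1) := by
          rw [List.mem_iff_getElem]
          refine ⟨qn - (k + 1), by rw [List.length_drop]; omega, ?_⟩
          rw [List.getElem_drop]
          congr 1
          omega
        have hany : (disk.drop (k + 1)).any (· != ".") = true := by
          rw [List.any_eq_true]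
          refine ⟨disk[qn]'(by omega), hmem, ?_⟩
          simpa using (hrj ▸ hne)
        simp only [hany, if_true]
        rw [if_pos (by omega)]
      · -- no file block after k : the suffix is all free
        have hqk : qn ≤ k := by rw [hqv] at hlt; omega
        have hany : (disk.drop (k + 1)).any (· != ".") = false := by
          rw [Bool.eq_false_iff]
          intro hc
          obtain ⟨x, hx, hxne⟩ := List.any_eq_true.mp hc
          rw [List.mem_iff_getElem] at hx
          obtain ⟨t, ht, hxt⟩ := hx
          rw [List.getElem_drop] at hxt
          have htl : k + 1 + t < disk.length := by
            have := ht; rw [List.length_drop] at this; omega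
          have : disk[k + 1 + t]'htl = "." := habove _ htl (by omega)
          rw [hxt] at this
          rw [this] at hxne
          simp at hxne
        simp only [hany, Bool.false_eq_true, if_false]
        rw [if_neg (by omega)]
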